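-- pv_equiv track=rewrite | github.com/424531476/google_translate | gettk.py | _TL
-- ===== SOURCE A (Python) =====
-- def _TKK():
--     return [406604, 1836941114]
--
-- def _RL(a, b):
--     for c in range(0, len(b) - 2, 3):
--         d = b[c + 2]
--         if d >= 'a':
--             d = ord(d) - 87
--         else:
--             d = int(d)
--         if b[c + 1] == '+':
--             d = a >> d
--         else:
--             d = a << d
--         if b[c] == '+':
--             a = a + d & (pow(2, 32) - 1)
--         else:
--             a = a ^ d
--     return a
--
-- def _TL(a: str):
--     tkk = _TKK()
--     b = tkk[0]
--     d = [i for i in a.encode('utf8')]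
--     a = b
--     for e in range(0, len(d)):
--         a += d[e]
--         a = _RL(a, "+-a^+6")
--     a = _RL(a, "+-3^+b+-f")
--     a = a ^ tkk[1]
--     if a < 0:
--         a = (a & (pow(2, 31) - 1)) + pow(2, 31)
--     a %= pow(10, 6)
--     return "%d.%d" % (a, a ^ b)
-- ===== SOURCE B (Python) =====
-- def _TL(a: str):
--     M = 0xFFFFFFFF
--     h = 406604
--     for e in a.encode('utf8'):
--         h = (h + e + ((h + e) << 10)) & M
--         h ^= h >> 6
--     h = (h + (h << 3)) & M
--     h ^= h >> 11
--     h = (h + (h << 15)) & M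
--     h ^= 1836941114
--     if h < 0:
--         h = (h & 0x7FFFFFFF) + 0x80000000
--     h %= 1000000
--     return "%d.%d" % (h, h ^ 406604)
-- ===== Notes on version B (the rewrite author's own statement) =====
-- stated objective: simpler
-- what changed: Removed the _RL opcode-string interpreter entirely: the per-byte mix and the final avalanche are written as direct straight-line shift/xor/mask arithmetic instead of being decoded from opcode strings at run time.
import Mathlib
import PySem

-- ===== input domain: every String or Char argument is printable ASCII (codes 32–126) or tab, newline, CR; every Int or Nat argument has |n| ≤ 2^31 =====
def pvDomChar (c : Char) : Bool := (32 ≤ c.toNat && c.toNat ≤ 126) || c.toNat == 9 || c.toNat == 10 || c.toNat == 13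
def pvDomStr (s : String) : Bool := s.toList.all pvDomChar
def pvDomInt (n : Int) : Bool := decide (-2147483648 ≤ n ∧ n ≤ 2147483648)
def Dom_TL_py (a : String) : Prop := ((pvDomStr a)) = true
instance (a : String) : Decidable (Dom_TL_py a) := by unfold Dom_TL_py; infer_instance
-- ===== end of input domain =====

-- B inlines the `_RL` opcode-string interpreter into straight-line shift/xor/mask arithmetic (objective: simpler).

-- ===== PORT A =====
-- literal port of _RL; `int(d)` is ported as ch.toNat - 48, exact because _TL only calls
-- _RL with opcode strings whose data characters are decimal digits or lowercase letters.
def RL_py (a : Int) (b : String) : Int :=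
  (PySem.List.pyRange 0 ((b.length : Int) - 2) 3).foldl (fun a c =>
    let ch := PySem.List.pyGetD b.toList (c + 2) ' '
    let d : Int := if 'a' ≤ ch then (ch.toNat : Int) - 87 else ((ch.toNat : Int) - 48)
    let d2 : Int := if PySem.List.pyGetD b.toList (c + 1) ' ' = '+' then a >>> d.toNat else a <<< d.toNat
    if PySem.List.pyGetD b.toList c ' ' = '+' then PySem.Int.band (a + d2) (2 ^ 32 - 1)
    else PySem.Int.bxor a d2) a

-- a.encode('utf8') is ported as the list of code points: exact on the ASCII domain Dom_TL_py.
def TL_py (a : String) : String :=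
  let tkk : List Int := [406604, 1836941114]
  let b : Int := tkk.getD 0 0
  let d : List Int := a.toList.map (fun c => (c.toNat : Int))
  let a1 := (PySem.List.pyRange 0 ((d.length : Int)) 1).foldl
      (fun acc e => RL_py (acc + PySem.List.pyGetD d e 0) "+-a^+6") b
  let a2 := RL_py a1 "+-3^+b+-f"
  let a3 := PySem.Int.bxor a2 (tkk.getD 1 0)
  let a4 := if a3 < 0 then PySem.Int.band a3 (2 ^ 31 - 1) + 2 ^ 31 else a3
  let a5 := PySem.Int.mod a4 (10 ^ 6)
  PySem.Int.toStr a5 ++ "." ++ PySem.Int.toStr (PySem.Int.bxor a5 b)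

-- ===== PORT B =====
def mix_alt (h e : Int) : Int :=
  let h := PySem.Int.band (h + e + ((h + e) <<< (10 : Nat))) 0xFFFFFFFF
  PySem.Int.bxor h (h >>> (6 : Nat))

def TL_py_alt (a : String) : String :=
  let h0 := a.toList.foldl (fun h c => mix_alt h (c.toNat : Int)) 406604
  let h1 := PySem.Int.band (h0 + (h0 <<< (3 : Nat))) 0xFFFFFFFF
  let h2 := PySem.Int.bxor h1 (h1 >>> (11 : Nat))
  let h3 := PySem.Int.band (h2 + (h2 <<< (15 : Nat))) 0xFFFFFFFF
  let h4 := PySem.Int.bxor h3 1836941114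
  let h5 := if h4 < 0 then PySem.Int.band h4 0x7FFFFFFF + 0x80000000 else h4
  let h6 := PySem.Int.mod h5 1000000
  PySem.Int.toStr h6 ++ "." ++ PySem.Int.toStr (PySem.Int.bxor h6 406604)

-- ===== PRECONDITION & SPEC =====
def Spec_TL_py (a : String) (out : String) : Prop := out = TL_py_alt a
instance (a : String) (out : String) : Decidable (Spec_TL_py a out) := by unfold Spec_TL_py; infer_instance

-- ===== CLAIM (what is proved, stated in full; the proofs are below) =====
def Claim_equal_TL_py : Prop := ∀ (a : String), Dom_TL_py a → Spec_TL_py a (TL_py a)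

-- ===== LEMMAS AND PROOFS =====
theorem RL_mix (x : Int) :
    RL_py x "+-a^+6" =
      PySem.Int.bxor (PySem.Int.band (x + (x <<< (10 : Nat))) 0xFFFFFFFF)
        (PySem.Int.band (x + (x <<< (10 : Nat))) 0xFFFFFFFF >>> (6 : Nat)) := by
  rw [RL_py, show PySem.List.pyRange 0 ((("+-a^+6").length : Int) - 2) 3 = [0, 3] from by decide,
      show ("+-a^+6").toList = ['+', '-', 'a', '^', '+', '6'] from by decide]
  simp only [List.foldl]
  simp [PySem.List.pyGetD, PySem.List.pyGet?, PySem.List.pyIdx?]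

theorem RL_fin (x : Int) :
    RL_py x "+-3^+b+-f" =
      (let h1 := PySem.Int.band (x + (x <<< (3 : Nat))) 0xFFFFFFFF
       let h2 := PySem.Int.bxor h1 (h1 >>> (11 : Nat))
       PySem.Int.band (h2 + (h2 <<< (15 : Nat))) 0xFFFFFFFF) := by
  rw [RL_py, show PySem.List.pyRange 0 ((("+-3^+b+-f").length : Int) - 2) 3 = [0, 3, 6] from by decide,
      show ("+-3^+b+-f").toList = ['+', '-', '3', '^', '+', 'b', '+', '-', 'f'] from by decide]
  simp only [List.foldl]
  simp [PySem.List.pyGetD, PySem.List.pyGet?, PySem.List.pyIdx?]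

-- ===== VERDICT (by name: the statement is the Claim_ definition above) =====
theorem TL_py_spec : Claim_equal_TL_py := by
  intro a _
  unfold Spec_TL_py
  simp only [TL_py, TL_py_alt]
  rw [PySem.List.foldl_pyRange_zero_pyGetD' (a.toList.map (fun c => (c.toNat : Int))) 0
      (fun acc x => RL_py (acc + x) "+-a^+6") ([(406604 : Int), 1836941114].getD 0 0)]
  simp only [List.foldl_map, RL_mix, RL_fin, mix_alt, List.getD_cons_zero, List.getD_cons_succ]
  norm_num
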